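-- pv_equiv track=rewrite | github.com/torchipeppo/python-utils | zzzyxas_the_queue_destroyer.py | get_task
-- ===== SOURCE A (Python) =====
-- def get_task(queue):
--     task = ""
--     while task == "":
--         try:
--             task = queue.pop(0).strip()
--         except IndexError:  # pop from empty list
--             return None
--     return task
-- ===== SOURCE B (Python) =====
-- def get_task(queue):
--     i = next((k for k, s in enumerate(queue) if s.strip()), None)
--     if i is None:
--         del queue[:]
--         return None
--     task = queue[i].strip()
--     del queue[:i + 1]
--     return task
-- ===== Notes on version B (the rewrite author's own statement) =====
-- stated objective: alternative
-- what changed: Replaces the pop(0)/try-except loop with an index-finding generator scan followed by one bulk slice deletion; it trades repeated front-pops for a single scan plus one slice delete.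
import Mathlib
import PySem

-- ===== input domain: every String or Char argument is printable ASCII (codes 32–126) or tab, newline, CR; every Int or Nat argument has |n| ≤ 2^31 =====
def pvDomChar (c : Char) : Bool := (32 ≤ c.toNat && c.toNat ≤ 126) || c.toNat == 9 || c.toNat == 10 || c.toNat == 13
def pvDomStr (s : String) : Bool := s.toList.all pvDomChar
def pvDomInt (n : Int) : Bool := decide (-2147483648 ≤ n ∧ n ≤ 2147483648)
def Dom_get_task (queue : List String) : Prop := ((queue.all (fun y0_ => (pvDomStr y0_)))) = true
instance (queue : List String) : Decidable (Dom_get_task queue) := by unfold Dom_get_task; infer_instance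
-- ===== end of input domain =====

-- B finds the index of the first non-empty-stripped item and removes the consumed prefix with one slice deletion, instead of repeatedly pop(0)-ing inside try/except; the equivalence proved is about the RETURN value only — both Pythons mutate `queue` identically (leading items up to and including the returned one removed, or the queue cleared).
-- ===== PORT A =====
-- A: while task == "": task = queue.pop(0).strip(), return None on IndexError; return task.
def get_task (queue : List String) : Option String :=
  match queue with
  | [] => none
  | x :: rest =>
    let task := PySem.Str.strip x
    if task = "" then get_task rest else some task

-- ===== PORT B =====
-- B: i = first index with queue[i].strip() truthy (none if no hit); None if no hit, else queue[i].strip().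
def get_task_alt (queue : List String) : Option String :=
  match List.findIdx? (fun s => !(PySem.Str.strip s = "")) queue with
  | none => none
  | some i => (PySem.List.pyGet? queue (i : Int)).map PySem.Str.strip

-- ===== PRECONDITION & SPEC =====
def Spec_get_task (queue : List String) (out : Option String) : Prop := out = get_task_alt queue
instance (queue : List String) (out : Option String) : Decidable (Spec_get_task queue out) := by unfold Spec_get_task; infer_instance

-- ===== CLAIM (what is proved, stated in full; the proofs are below) =====
def Claim_equal_get_task : Prop := ∀ (queue : List String), Dom_get_task queue → Spec_get_task queue (get_task queue)

-- ===== LEMMAS AND PROOFS =====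

-- ===== VERDICT (by name: the statement is the Claim_ definition above) =====
theorem ports_agree : ∀ (queue : List String), get_task queue = get_task_alt queue := by
  intro queue
  induction queue with
  | nil => rfl
  | cons x xs ih =>
    simp only [get_task, get_task_alt, List.findIdx?_cons]
    by_cases h : PySem.Str.strip x = ""
    · simp only [h, decide_true, Bool.not_true, ih, get_task_alt]
      cases hf : List.findIdx? (fun s => !(PySem.Str.strip s = "")) xs with
      | none => simp
      | some i => simp [PySem.List.pyGet?_natCast]
    · simp [h]

theorem get_task_spec : Claim_equal_get_task := by
  intro queue _
  unfold Spec_get_task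
  exact ports_agree queue
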